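-- pv_equiv track=rewrite | github.com/omerlefaruk/CasareRPA | src/casare_rpa/utils/fuzzy_search.py | _match_word_initials
-- ===== SOURCE A (Python) =====
-- from typing import List, Tuple, Optional, Set, Dict
--
-- SCORE_WORD_INITIAL_MATCH = 300
--
-- def _match_word_initials(query: str, target: str, target_lower: str) -> Tuple[bool, int, List[int]]:
--     """
--     Match query against word initials.
--
--     "lb" matches "Launch Browser"
--     "b l" matches "Browser Launch"
--     "ce" matches "Click Element"
--     """
--     # Get word start positions and their characters
--     word_starts = []  # List of (position, char)
--     for i, char in enumerate(target_lower):
--         if i == 0 or target_lower[i-1] in ' -_':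
--             word_starts.append((i, char))
--
--     if not word_starts:
--         return False, 999999, []
--
--     # Get query characters (without spaces)
--     query_chars = [c for c in query.lower() if c != ' ']
--
--     if not query_chars:
--         return False, 999999, []
--
--     # Try to match each query char to a word initial
--     # Allow matching in any order for flexibility
--     positions = []
--     used_words = set()
--
--     for qchar in query_chars:
--         found = False
--         for idx, (pos, initial) in enumerate(word_starts):
--             if idx not in used_words and initial == qchar:
--                 positions.append(pos)
--                 used_words.add(idx)
--                 found = True
--                 break
--
--         if not found:
--             # Try matching to word prefixes (first few chars of each word)
--             for idx, (pos, _) in enumerate(word_starts):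
--                 if idx in used_words:
--                     continue
--                 # Check if this word starts with the query char
--                 if target_lower[pos] == qchar:
--                     positions.append(pos)
--                     used_words.add(idx)
--                     found = True
--                     break
--
--         if not found:
--             return False, 999999, []
--
--     if len(positions) == len(query_chars):
--         # Sort positions for proper highlighting
--         positions.sort()
--         # Score: prefer matches that use fewer words and earlier positions
--         score = -SCORE_WORD_INITIAL_MATCH + sum(positions) // 10
--         return True, score, positions
--
--     return False, 999999, []
-- ===== SOURCE B (Python) =====
-- SCORE_WORD_INITIAL_MATCH = 300
--
-- def _match_word_initials(query, target, target_lower):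
--     # Count-based batch matching: A's greedy per-query-char scan consumes, for each
--     # character c, exactly the first count(c) word-start positions whose initial is c
--     # (in order), independent of interleaving.  So: count query chars, bucket the
--     # word-start positions by initial, and take a prefix of each bucket at once.
--     need = {}
--     for c in query.lower():
--         if c != ' ':
--             need[c] = need.get(c, 0) + 1
--     if not need or not target_lower:
--         return False, 999999, []
--     buckets = {}
--     for i, ch in enumerate(target_lower):
--         if i == 0 or target_lower[i - 1] in ' -_':
--             buckets.setdefault(ch, []).append(i)
--     positions = []
--     for c, n in need.items():
--         lst = buckets.get(c, [])
--         if n > len(lst):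
--             return False, 999999, []
--         positions.extend(lst[:n])
--     positions.sort()
--     return True, -SCORE_WORD_INITIAL_MATCH + sum(positions) // 10, positions
-- ===== Notes on version B (the rewrite author's own statement) =====
-- stated objective: alternative
-- what changed: B replaces A's per-query-char greedy rescans of the word-start list (with a used-index set) by count-based batch selection: count query characters once, bucket word-start positions by initial once, and take the first count(c) positions of each bucket in one shot; this is correct because A's greedy loop consumes, per character, exactly that prefix regardless of interleaving, and the result is sorted anyway.
import Mathlib
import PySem

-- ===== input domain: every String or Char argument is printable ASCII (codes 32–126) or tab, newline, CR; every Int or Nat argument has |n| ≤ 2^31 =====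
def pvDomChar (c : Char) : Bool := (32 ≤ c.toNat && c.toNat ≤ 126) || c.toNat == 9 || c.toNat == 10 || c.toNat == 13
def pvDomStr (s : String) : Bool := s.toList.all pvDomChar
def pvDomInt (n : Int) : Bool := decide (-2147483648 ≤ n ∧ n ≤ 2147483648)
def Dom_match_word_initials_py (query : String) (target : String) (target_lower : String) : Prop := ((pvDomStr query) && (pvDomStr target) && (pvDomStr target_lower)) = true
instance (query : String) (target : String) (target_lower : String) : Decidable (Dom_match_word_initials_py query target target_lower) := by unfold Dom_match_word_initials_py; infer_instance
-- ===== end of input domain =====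

-- B replaces A's per-query-char greedy rescans (with a used-index set) by count-based
-- batch selection: count query chars once, bucket word-start positions by initial once,
-- take the first count(c) positions of each bucket, sort (objective: alternative).

-- ===== PORT A =====
-- A: word-start guard — "i == 0 or target_lower[i-1] in ' -_'"; for i ≠ 0 the index i-1
-- is always in range, so the pyGet? none branch (Python IndexError) is unreachable.
def pvA_isStart (tl : List Char) (i : Int) : Bool :=
  decide (i = 0) || ((PySem.List.pyGet? tl (i - 1)).any (fun c => c == ' ' || c == '-' || c == '_'))

-- A: the word_starts list built by the first for-loop (entries are (position, char))
def pvA_wordStarts (tl : List Char) : List (Int × Char) :=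
  (PySem.List.enumerate tl).foldl
    (fun acc ic => if pvA_isStart tl ic.1 then acc ++ [ic] else acc) []

-- A: first inner scan — first enumerate index not in used whose stored initial equals qchar
def pvA_find1 (ews : List (Int × Int × Char)) (used : PySem.Set Int) (q : Char) : Option (Int × Int) :=
  match ews with
  | [] => none
  | e :: rest => if e.1 ∉ used ∧ e.2.2 = q then some (e.1, e.2.1) else pvA_find1 rest used q

-- A: fallback scan — skips used indices, then tests target_lower[pos] == qchar
-- (pos is a stored in-range index, so pyGet? always returns some here)
def pvA_find2 (tl : List Char) (ews : List (Int × Int × Char)) (used : PySem.Set Int) (q : Char) : Option (Int × Int) :=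
  match ews with
  | [] => none
  | e :: rest =>
    if e.1 ∈ used then pvA_find2 tl rest used q
    else if PySem.List.pyGet? tl e.2.1 = some q then some (e.1, e.2.1)
    else pvA_find2 tl rest used q

-- A: main loop over query chars; none = the early "return False, 999999, []"
def pvA_loop (tl : List Char) (ews : List (Int × Int × Char)) :
    List Char → List Int → PySem.Set Int → Option (List Int)
  | [], positions, _ => some positions
  | q :: qs, positions, used =>
    match pvA_find1 ews used q with
    | some ip => pvA_loop tl ews qs (positions ++ [ip.2]) (PySem.Set.add used ip.1)
    | none =>
      match pvA_find2 tl ews used q with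
      | some ip => pvA_loop tl ews qs (positions ++ [ip.2]) (PySem.Set.add used ip.1)
      | none => none

-- SCORE_WORD_INITIAL_MATCH = 300
def match_word_initials_py (query : String) (target : String) (target_lower : String) : Bool × Int × List Int :=
  let tl := target_lower.toList
  let ws := pvA_wordStarts tl
  if ws = [] then (false, 999999, [])
  else
    let qcs := (PySem.Str.lower query).toList.filter (fun c => decide (c ≠ ' '))
    if qcs = [] then (false, 999999, [])
    else
      match pvA_loop tl (PySem.List.enumerate ws) qcs [] PySem.Set.empty with
      | none => (false, 999999, [])
      | some positions =>
        if positions.length = qcs.length then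
          let ps := PySem.List.sorted positions (fun x => x) false
          (true, -300 + PySem.Int.floordiv ps.sum 10, ps)
        else (false, 999999, [])

-- ===== PORT B =====
-- B: same word-start guard as the source line "i == 0 or target_lower[i - 1] in ' -_'"
def pvB_isStart (tl : List Char) (i : Int) : Bool :=
  decide (i = 0) || ((PySem.List.pyGet? tl (i - 1)).any (fun c => c == ' ' || c == '-' || c == '_'))

-- B: "need[c] = need.get(c, 0) + 1" over the lowered query, skipping spaces
def pvB_need (qs : List Char) : PySem.Dict Char Int :=
  qs.foldl (fun d c => if c ≠ ' ' then d.insert c (d.getD c 0 + 1) else d) PySem.Dict.empty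

-- B: dict char → ordered list of word-start positions (buckets.setdefault(ch, []).append(i))
def pvB_starts (tl : List Char) : PySem.Dict Char (List Int) :=
  (PySem.List.enumerate tl).foldl
    (fun d ic => if pvB_isStart tl ic.1 then d.modify ic.2 [] (fun l => l ++ [ic.1]) else d)
    PySem.Dict.empty

-- B: "for c, n in need.items(): … positions.extend(lst[:n])"; none = early False return
def pvB_collect (buckets : PySem.Dict Char (List Int)) :
    List (Char × Int) → List Int → Option (List Int)
  | [], positions => some positions
  | (c, n) :: rest, positions =>
    let lst := buckets.getD c []
    if n > PySem.List.len lst then none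
    else pvB_collect buckets rest (positions ++ PySem.List.slice lst none (some n))

-- SCORE_WORD_INITIAL_MATCH = 300
def match_word_initials_py_alt (query : String) (target : String) (target_lower : String) : Bool × Int × List Int :=
  let need := pvB_need (PySem.Str.lower query).toList
  if need.items = [] ∨ target_lower.toList = [] then (false, 999999, [])
  else
    match pvB_collect (pvB_starts target_lower.toList) need.items [] with
    | none => (false, 999999, [])
    | some positions =>
      let ps := PySem.List.sorted positions (fun x => x) false
      (true, -300 + PySem.Int.floordiv ps.sum 10, ps)

-- ===== PRECONDITION & SPEC =====
def Spec_match_word_initials_py (query : String) (target : String) (target_lower : String) (out : Bool × Int × List Int) : Prop := out = match_word_initials_py_alt query target target_lower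
instance (query : String) (target : String) (target_lower : String) (out : Bool × Int × List Int) : Decidable (Spec_match_word_initials_py query target target_lower out) := by unfold Spec_match_word_initials_py; infer_instance

-- ===== CLAIM (what is proved, stated in full; the proofs are below) =====
def Claim_equal_match_word_initials_py : Prop := ∀ (query : String) (target : String) (target_lower : String), Dom_match_word_initials_py query target target_lower → Spec_match_word_initials_py query target target_lower (match_word_initials_py query target target_lower)

-- ===== LEMMAS AND PROOFS =====

-- proof-side pointer loop: intermediate between A's used-set loop and B's batch collect
-- (processes query chars one at a time, but per char c consumes bucket c in order)
def pvP_loop (starts : PySem.Dict Char (List Int)) :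
    List Char → PySem.Dict Char Int → List Int → Option (List Int)
  | [], _, positions => some positions
  | c :: cs, nexti, positions =>
    if c = ' ' then pvP_loop starts cs nexti positions
    else
      match starts.get? c with
      | none => none
      | some lst =>
        let k := nexti.getD c 0
        if k ≥ PySem.List.len lst then none
        else pvP_loop starts cs (nexti.insert c (k + 1)) (positions ++ [PySem.List.pyGetD lst k 0])

-- the two guards are the same function
theorem pv_isStart_eq : pvB_isStart = pvA_isStart := rfl

-- word_starts is the filter of the enumeration by the guard
theorem pv_ws_eq_filter (tl : List Char) :
    pvA_wordStarts tl = (PySem.List.enumerate tl).filter (fun ic => pvA_isStart tl ic.1) := by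
  simpa using PySem.List.foldl_append_if_eq_filter (fun ic => pvA_isStart tl ic.1)
    (PySem.List.enumerate tl) []

-- entries of the enumeration: index in range and pointing at its char
theorem pv_mem_enumerate {α : Type} (xs : List α) (e : Int × α)
    (h : e ∈ PySem.List.enumerate xs) : 0 ≤ e.1 ∧ PySem.List.pyGet? xs e.1 = some e.2 := by
  rw [PySem.List.enumerate_eq_map_pyRange xs e.2] at h
  obtain ⟨j, hj, he⟩ := List.mem_map.1 h
  obtain ⟨hj0, hjlt⟩ := PySem.List.mem_pyRange_one.1 hj
  rw [PySem.List.len_eq] at hjlt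
  rw [← he]
  refine ⟨hj0, ?_⟩
  rw [PySem.List.pyGet?_eq_some_getElem xs hj0 hjlt,
    PySem.List.pyGetD_eq_getElem xs _ hj0 hjlt]

-- second components of the enumeration are elements
theorem pv_snd_mem_enumerate {α : Type} (xs : List α) (e : Int × α)
    (h : e ∈ PySem.List.enumerate xs) : e.2 ∈ xs := by
  have h2 := (pv_mem_enumerate xs e h).2
  exact PySem.List.mem_of_pyGet?_eq_some (xs := xs) (i := e.1) h2

-- first components of the enumeration are 0..n-1
theorem pv_map_fst_enumerate {α : Type} (xs : List α) (d : α) :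
    (PySem.List.enumerate xs).map Prod.fst = PySem.List.pyRange 0 (PySem.List.len xs) 1 := by
  rw [PySem.List.enumerate_eq_map_pyRange xs d, List.map_map]
  simp [Function.comp_def]

-- filtering an enumeration by a predicate on the element, then projecting, is filtering
theorem pv_map_snd_filter_enumerate {α : Type} (xs : List α) (s : Int) (p : α → Bool) :
    ((PySem.List.enumerate xs s).filter (fun e => p e.2)).map Prod.snd = xs.filter p := by
  induction xs generalizing s with
  | nil => simp [PySem.List.enumerate_nil]
  | cons x xs ih =>
    rw [PySem.List.enumerate_cons, List.filter_cons, List.filter_cons]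
    by_cases hp : p x
    · simp only [hp, if_pos, List.map_cons]
      rw [ih]
    · simp only [hp]
      simpa using ih (s + 1)

-- the bucket dict holds, for each char, the positions of the word starts with that initial
theorem pv_starts_getD (tl : List Char) (c : Char) :
    (pvB_starts tl).getD c [] =
      ((pvA_wordStarts tl).filter (fun e => decide (e.2 = c))).map Prod.fst := by
  unfold pvB_starts
  rw [pv_isStart_eq]
  have hsplit : List.foldl
      (fun (d : PySem.Dict Char (List Int)) (ic : Int × Char) =>
        if pvA_isStart tl ic.1 then d.modify ic.2 [] (fun l => l ++ [ic.1]) else d)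
      PySem.Dict.empty (PySem.List.enumerate tl)
      = List.foldl (fun d ic => d.modify ic.2 [] (fun l => l ++ [ic.1])) PySem.Dict.empty
          ((PySem.List.enumerate tl).filter (fun ic => pvA_isStart tl ic.1)) :=
    PySem.List.foldl_if_eq_foldl_filter _ _ _ _
  rw [hsplit, ← pv_ws_eq_filter]
  have hmap : List.foldl
      (fun (d : PySem.Dict Char (List Int)) (ic : Int × Char) =>
        d.modify ic.2 [] (fun l => l ++ [ic.1])) PySem.Dict.empty (pvA_wordStarts tl)
      = List.foldl (fun d (p : Char × Int) => d.modify p.1 [] (fun l => l ++ [p.2]))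
          PySem.Dict.empty ((pvA_wordStarts tl).map (fun ic => (ic.2, ic.1))) :=
    by rw [List.foldl_map]
  rw [hmap, PySem.Dict.getD_foldl_modify_append, PySem.Dict.getD_empty, List.nil_append,
    List.filter_map, List.map_map]
  exact congrArg _ (List.filter_congr (fun x _ => Bool.beq_eq_decide_eq x.2 c))

-- find1 is "head of the filtered list"
theorem pv_find1_eq (L : List (Int × Int × Char)) (used : PySem.Set Int) (q : Char) :
    pvA_find1 L used q =
      ((L.filter (fun e => decide (e.1 ∉ used ∧ e.2.2 = q))).head?).map (fun e => (e.1, e.2.1)) := by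
  induction L with
  | nil => simp [pvA_find1]
  | cons e rest ih =>
    rw [pvA_find1, List.filter_cons]
    by_cases h : e.1 ∉ used ∧ e.2.2 = q
    · simp [h]
    · simp only [h, decide_false, if_neg, Bool.false_eq_true, not_false_iff]
      simpa [h] using ih

-- find2 is the same with the indexed-char test
theorem pv_find2_eq (tl : List Char) (L : List (Int × Int × Char)) (used : PySem.Set Int) (q : Char) :
    pvA_find2 tl L used q =
      ((L.filter (fun e => decide (e.1 ∉ used ∧ PySem.List.pyGet? tl e.2.1 = some q))).head?).map
        (fun e => (e.1, e.2.1)) := by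
  induction L with
  | nil => simp [pvA_find2]
  | cons e rest ih =>
    rw [pvA_find2, List.filter_cons]
    by_cases hu : e.1 ∈ used
    · have hn : ¬ (e.1 ∉ used ∧ PySem.List.pyGet? tl e.2.1 = some q) := by tauto
      simpa [hu, hn] using ih
    · by_cases hq : PySem.List.pyGet? tl e.2.1 = some q
      · simp [hu, hq]
      · have hn : ¬ (e.1 ∉ used ∧ PySem.List.pyGet? tl e.2.1 = some q) := by tauto
        simpa [hu, hq, hn] using ih

-- on lists whose entries carry their own indexed char, find2 is find1
theorem pv_find2_eq_find1 (tl : List Char) (L : List (Int × Int × Char)) (used : PySem.Set Int) (q : Char)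
    (h : ∀ e ∈ L, PySem.List.pyGet? tl e.2.1 = some e.2.2) :
    pvA_find2 tl L used q = pvA_find1 L used q := by
  rw [pv_find1_eq, pv_find2_eq]
  have : L.filter (fun e => decide (e.1 ∉ used ∧ PySem.List.pyGet? tl e.2.1 = some q))
      = L.filter (fun e => decide (e.1 ∉ used ∧ e.2.2 = q)) := by
    refine List.filter_congr ?_
    intro e he
    rw [h e he]
    simp
  rw [this]

-- the sub-list of word starts (with enumerate indices) whose initial is c
def pvF (tl : List Char) (c : Char) : List (Int × Int × Char) :=
  (PySem.List.enumerate (pvA_wordStarts tl)).filter (fun e => decide (e.2.2 = c))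

-- loop invariant: pointers are nonnegative and, per char, the unused word starts
-- are exactly the suffix of pvF from the pointer on
def pvInv (tl : List Char) (used : PySem.Set Int) (nexti : PySem.Dict Char Int) : Prop :=
  (∀ c, 0 ≤ nexti.getD c 0) ∧
  ∀ c, (pvF tl c).filter (fun e => decide (e.1 ∉ used)) = (pvF tl c).drop (nexti.getD c 0).toNat

theorem pv_inv_init (tl : List Char) : pvInv tl PySem.Set.empty PySem.Dict.empty := by
  constructor
  · intro c; rw [PySem.Dict.getD_empty]
  · intro c
    rw [PySem.Dict.getD_empty]
    simp [PySem.Set.empty]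

-- word-start entries point at their own char
theorem pv_ws_char (tl : List Char) (e : Int × Char) (h : e ∈ pvA_wordStarts tl) :
    PySem.List.pyGet? tl e.1 = some e.2 := by
  rw [pv_ws_eq_filter] at h
  exact (pv_mem_enumerate tl e (List.mem_filter.1 h).1).2

-- enumerate indices are distinct
theorem pv_fst_inj {α : Type} (xs : List α) {x y : Int × α}
    (hx : x ∈ PySem.List.enumerate xs) (hy : y ∈ PySem.List.enumerate xs)
    (hxy : x.1 = y.1) : x = y := by
  cases xs with
  | nil => simp [PySem.List.enumerate_nil] at hx
  | cons a as =>
    have hnd : ((PySem.List.enumerate (a :: as)).map Prod.fst).Nodup := by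
      rw [pv_map_fst_enumerate (a :: as) a]
      exact PySem.List.nodup_pyRange_one _ _
    exact List.inj_on_of_nodup_map hnd hx hy hxy

-- the projection of pvF is the filtered word-start list
theorem pv_F_snd (tl : List Char) (c : Char) :
    (pvF tl c).map Prod.snd = (pvA_wordStarts tl).filter (fun x => decide (x.2 = c)) :=
  pv_map_snd_filter_enumerate (pvA_wordStarts tl) 0 (fun y => decide (y.2 = c))

-- B's per-char bucket is the positions of pvF, in order
theorem pv_starts_eq_F (tl : List Char) (c : Char) :
    (pvB_starts tl).getD c [] = (pvF tl c).map (fun e => e.2.1) := by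
  rw [pv_starts_getD, ← pv_F_snd, List.map_map]
  rfl

-- the indices in pvF are distinct
theorem pv_nodup_fst_F (tl : List Char) (c : Char) : ((pvF tl c).map Prod.fst).Nodup := by
  have hsub : (pvF tl c).Sublist (PySem.List.enumerate (pvA_wordStarts tl)) :=
    List.filter_sublist
  have : ((pvF tl c).map Prod.fst).Sublist
      ((PySem.List.enumerate (pvA_wordStarts tl)).map Prod.fst) := hsub.map _
  refine this.nodup ?_
  rw [pv_map_fst_enumerate (pvA_wordStarts tl) (0, ' ')]
  exact PySem.List.nodup_pyRange_one _ _

-- one matched query char preserves the invariant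
theorem pv_inv_step (tl : List Char) (used : PySem.Set Int) (nexti : PySem.Dict Char Int)
    (c : Char) (e : Int × Int × Char) (hInv : pvInv tl used nexti)
    (he : (pvF tl c)[(nexti.getD c 0).toNat]? = some e) :
    pvInv tl (PySem.Set.add used e.1) (nexti.insert c (nexti.getD c 0 + 1)) := by
  have hk0 : 0 ≤ nexti.getD c 0 := hInv.1 c
  obtain ⟨hlt, hgetE⟩ := List.getElem?_eq_some_iff.1 he
  have heMem : e ∈ pvF tl c := hgetE ▸ List.getElem_mem hlt
  have heChar : e.2.2 = c := by
    have := (List.mem_filter.1 heMem).2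
    simpa using this
  constructor
  · intro c'
    rw [PySem.Dict.getD_insert]
    split_ifs with hc
    · omega
    · exact hInv.1 c'
  · intro c'
    rw [PySem.Dict.getD_insert]
    by_cases hc : c' = c
    · subst hc
      simp only [if_pos]
      have htoNat : (nexti.getD c' 0 + 1).toNat = (nexti.getD c' 0).toNat + 1 := by omega
      rw [htoNat]
      have hsplit : (pvF tl c').filter (fun x => decide (x.1 ∉ PySem.Set.add used e.1))
          = ((pvF tl c').filter (fun x => decide (x.1 ∉ used))).filter
              (fun x => decide (x.1 ≠ e.1)) := by
        rw [List.filter_filter]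
        refine List.filter_congr ?_
        intro x _
        have hiff : (x.1 ∉ PySem.Set.add used e.1) ↔ (x.1 ≠ e.1 ∧ x.1 ∉ used) := by
          rw [PySem.Set.mem_add]; tauto
        rw [decide_eq_decide.mpr hiff, Bool.decide_and, Bool.and_comm]
      rw [hsplit, hInv.2 c', List.drop_eq_getElem_cons hlt, hgetE, List.filter_cons]
      simp only [ne_eq, not_true_eq_false, decide_false, Bool.false_eq_true, if_neg,
        not_false_iff]
      have hnd : ((pvF tl c').drop ((nexti.getD c' 0).toNat)).map Prod.fst
          = e.1 :: ((pvF tl c').drop ((nexti.getD c' 0).toNat + 1)).map Prod.fst := by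
        rw [List.drop_eq_getElem_cons hlt, hgetE, List.map_cons]
      have hndrop : (((pvF tl c').drop ((nexti.getD c' 0).toNat)).map Prod.fst).Nodup := by
        rw [List.map_drop]
        exact (List.drop_sublist _ _).nodup (pv_nodup_fst_F tl c')
      rw [hnd] at hndrop
      have hne : ∀ x ∈ (pvF tl c').drop ((nexti.getD c' 0).toNat + 1), x.1 ≠ e.1 := by
        intro x hx hxe
        exact (List.nodup_cons.1 hndrop).1 (hxe ▸ List.mem_map_of_mem hx)
      refine List.filter_eq_self.2 ?_
      intro x hx
      simpa using hne x hx
    · rw [if_neg hc, ← hInv.2 c']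
      refine List.filter_congr ?_
      intro x hx
      have hxChar : x.2.2 = c' := by
        have := (List.mem_filter.1 hx).2
        simpa using this
      have hxe : x.1 ≠ e.1 := by
        intro hxy
        have hxE : x ∈ PySem.List.enumerate (pvA_wordStarts tl) := (List.mem_filter.1 hx).1
        have heE : e ∈ PySem.List.enumerate (pvA_wordStarts tl) := (List.mem_filter.1 heMem).1
        have := pv_fst_inj _ hxE heE hxy
        rw [this] at hxChar
        exact hc (hxChar ▸ heChar ▸ rfl)
      have hiff : (x.1 ∉ PySem.Set.add used e.1) ↔ (x.1 ∉ used) := by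
        rw [PySem.Set.mem_add]; tauto
      rw [decide_eq_decide.mpr hiff]

-- A's used-set loop is the pointer loop, under the invariant
theorem pv_loop_eq (tl : List Char) :
    ∀ (qs : List Char) (used : PySem.Set Int) (nexti : PySem.Dict Char Int) (positions : List Int),
    pvInv tl used nexti →
    pvP_loop (pvB_starts tl) qs nexti positions =
      pvA_loop tl (PySem.List.enumerate (pvA_wordStarts tl))
        (qs.filter (fun c => decide (c ≠ ' '))) positions used := by
  intro qs
  induction qs with
  | nil =>
    intro used nexti positions _
    simp [pvP_loop, pvA_loop]
  | cons c cs ih =>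
    intro used nexti positions hInv
    by_cases hsp : c = ' '
    · subst hsp
      rw [List.filter_cons]
      simp only [ne_eq, not_true_eq_false, decide_false, Bool.false_eq_true, if_neg,
        not_false_iff]
      rw [pvP_loop, if_pos rfl]
      exact ih used nexti positions hInv
    · have hfc : (c :: cs).filter (fun c => decide (c ≠ ' '))
          = c :: cs.filter (fun c => decide (c ≠ ' ')) := by simp [hsp]
      rw [hfc]
      have hk0 : 0 ≤ nexti.getD c 0 := hInv.1 c
      have hfind1 : pvA_find1 (PySem.List.enumerate (pvA_wordStarts tl)) used c
          = ((pvF tl c)[(nexti.getD c 0).toNat]?).map (fun e => (e.1, e.2.1)) := by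
        rw [pv_find1_eq]
        have hpred : (PySem.List.enumerate (pvA_wordStarts tl)).filter
            (fun e => decide (e.1 ∉ used ∧ e.2.2 = c))
            = (pvF tl c).filter (fun e => decide (e.1 ∉ used)) := by
          unfold pvF
          rw [List.filter_filter]
          refine List.filter_congr ?_
          intro x _
          rw [Bool.decide_and, Bool.and_comm]
        rw [hpred, hInv.2 c, List.head?_drop]
      have hchar : ∀ e ∈ PySem.List.enumerate (pvA_wordStarts tl),
          PySem.List.pyGet? tl e.2.1 = some e.2.2 := fun e hme =>
        pv_ws_char tl e.2 (pv_snd_mem_enumerate _ e hme)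
      have hfind2 := pv_find2_eq_find1 tl (PySem.List.enumerate (pvA_wordStarts tl)) used c hchar
      rw [pvP_loop, if_neg hsp]
      cases hg : (pvB_starts tl).get? c with
      | none =>
        have hgetD : (pvB_starts tl).getD c [] = [] :=
          PySem.Dict.getD_of_get?_eq_none _ _ hg
        have hFnil : pvF tl c = [] := by
          have h2 := pv_starts_eq_F tl c
          rw [hgetD] at h2
          exact List.map_eq_nil_iff.1 h2.symm
        have hnone : (pvF tl c)[(nexti.getD c 0).toNat]? = none := by
          rw [hFnil]; simp
        simp [pvA_loop, hfind2, hfind1, hnone]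
      | some lst =>
        have hlst : lst = (pvF tl c).map (fun e => e.2.1) := by
          have h2 := PySem.Dict.getD_of_get?_eq_some (pvB_starts tl) ([] : List Int) hg
          rw [pv_starts_eq_F] at h2
          exact h2.symm
        subst hlst
        change (if nexti.getD c 0 ≥ PySem.List.len ((pvF tl c).map (fun e => e.2.1)) then none
          else pvP_loop (pvB_starts tl) cs (nexti.insert c (nexti.getD c 0 + 1))
            (positions ++
              [PySem.List.pyGetD ((pvF tl c).map (fun e => e.2.1)) (nexti.getD c 0) 0])) = _
        by_cases hge : nexti.getD c 0 ≥ PySem.List.len ((pvF tl c).map (fun e => e.2.1))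
        · rw [if_pos hge]
          rw [PySem.List.len_eq, List.length_map] at hge
          have hnone : (pvF tl c)[(nexti.getD c 0).toNat]? = none := by
            rw [List.getElem?_eq_none_iff]
            omega
          simp [pvA_loop, hfind2, hfind1, hnone]
        · rw [if_neg hge]
          rw [PySem.List.len_eq, List.length_map] at hge
          push Not at hge
          have hklt : (nexti.getD c 0).toNat < (pvF tl c).length := by omega
          have hsome : (pvF tl c)[(nexti.getD c 0).toNat]?
              = some ((pvF tl c)[(nexti.getD c 0).toNat]) := List.getElem?_eq_getElem hklt
          have hval : PySem.List.pyGetD ((pvF tl c).map (fun e => e.2.1)) (nexti.getD c 0) 0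
              = ((pvF tl c)[(nexti.getD c 0).toNat]).2.1 := by
            rw [PySem.List.pyGetD_eq_getElem ((pvF tl c).map (fun e => e.2.1)) 0 hk0
              (by rw [List.length_map]; exact_mod_cast hge)]
            simp
          rw [pvA_loop, hfind1, hsome]
          simp only [Option.map_some]
          rw [hval]
          exact ih _ _ _ (pv_inv_step tl used nexti c _ hInv hsome)

-- A's loop grows positions by one per query char
theorem pv_loop_length (tl : List Char) (ews : List (Int × Int × Char)) :
    ∀ (qs : List Char) (positions : List Int) (used : PySem.Set Int) (ps : List Int),
    pvA_loop tl ews qs positions used = some ps → ps.length = positions.length + qs.length := by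
  intro qs
  induction qs with
  | nil =>
    intro positions used ps h
    simp only [pvA_loop, Option.some_inj] at h
    subst h; simp
  | cons q qs ih =>
    intro positions used ps h
    rw [pvA_loop] at h
    rcases h1 : pvA_find1 ews used q with _ | ip
    · rw [h1] at h
      rcases h2 : pvA_find2 tl ews used q with _ | ip
      · rw [h2] at h; exact absurd h (by simp)
      · rw [h2] at h
        have := ih _ _ _ h
        simp at this ⊢; omega
    · rw [h1] at h
      have := ih _ _ _ h
      simp at this ⊢; omega

-- word_starts is empty exactly when target_lower is empty (index 0 always starts a word)
theorem pv_ws_nil_iff (tl : List Char) : pvA_wordStarts tl = [] ↔ tl = [] := by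
  rw [pv_ws_eq_filter]
  cases tl with
  | nil => simp [PySem.List.enumerate_nil]
  | cons x xs =>
    rw [PySem.List.enumerate_cons, List.filter_cons]
    simp [pvA_isStart]

-- the pointer loop fails exactly when some query char needs more starts than remain
theorem pv_none_iff (starts : PySem.Dict Char (List Int)) :
    ∀ (qs : List Char) (nexti : PySem.Dict Char Int) (positions : List Int),
    (∀ c, 0 ≤ nexti.getD c 0) → (∀ c ∈ qs, c ≠ ' ') →
    (pvP_loop starts qs nexti positions = none ↔
      ∃ c ∈ qs, PySem.List.len (starts.getD c []) < nexti.getD c 0 + (qs.count c : Int)) := by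
  intro qs
  induction qs with
  | nil =>
    intro nexti positions _ _
    simp [pvP_loop]
  | cons c cs ih =>
    intro nexti positions h0 hsp
    have hc : c ≠ ' ' := hsp c List.mem_cons_self
    have hcnt_self : (c :: cs).count c = cs.count c + 1 := by simp
    have hcnt_ne : ∀ c', c' ≠ c → (c :: cs).count c' = cs.count c' := by
      intro c' hcc
      have hcc' : ¬ c = c' := fun h => hcc h.symm
      simp [List.count_cons, hcc, hcc']
    rw [pvP_loop, if_neg hc]
    cases hg : starts.get? c with
    | none =>
      have hgd : starts.getD c [] = [] := PySem.Dict.getD_of_get?_eq_none _ _ hg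
      simp only [true_iff]
      refine ⟨c, List.mem_cons_self, ?_⟩
      rw [hgd, hcnt_self]
      have := h0 c
      simp only [PySem.List.len_eq, List.length_nil, Nat.cast_zero]
      push_cast
      omega
    | some lst =>
      have hgd : starts.getD c [] = lst := PySem.Dict.getD_of_get?_eq_some starts ([] : List Int) hg
      dsimp only
      by_cases hge : nexti.getD c 0 ≥ PySem.List.len lst
      · rw [if_pos hge]
        simp only [true_iff]
        refine ⟨c, List.mem_cons_self, ?_⟩
        rw [hgd, hcnt_self]
        push_cast
        omega
      · rw [if_neg hge]
        have h0' : ∀ c', 0 ≤ (nexti.insert c (nexti.getD c 0 + 1)).getD c' 0 := by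
          intro c'
          rw [PySem.Dict.getD_insert]
          split_ifs
          · have := h0 c; omega
          · exact h0 c'
        rw [ih (nexti.insert c (nexti.getD c 0 + 1)) _ h0'
          (fun c' hc' => hsp c' (List.mem_cons_of_mem _ hc'))]
        constructor
        · rintro ⟨c', hc', hlt⟩
          rw [PySem.Dict.getD_insert] at hlt
          by_cases hcc : c' = c
          · subst hcc
            rw [if_pos rfl, hgd] at hlt
            refine ⟨c', List.mem_cons_self, ?_⟩
            rw [hgd, hcnt_self]
            push_cast at hlt ⊢
            omega
          · rw [if_neg hcc] at hlt
            refine ⟨c', List.mem_cons_of_mem _ hc', ?_⟩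
            rw [hcnt_ne c' hcc]
            exact hlt
        · rintro ⟨c', hc', hlt⟩
          by_cases hcc : c' = c
          · subst hcc
            rw [hgd, hcnt_self] at hlt
            have hmem : c' ∈ cs := by
              by_contra hn
              rw [List.count_eq_zero.2 hn] at hlt
              push_cast at hlt
              omega
            refine ⟨c', hmem, ?_⟩
            rw [PySem.Dict.getD_insert, if_pos rfl, hgd]
            push_cast at hlt ⊢
            omega
          · have hmem : c' ∈ cs := by
              rcases List.mem_cons.1 hc' with h | h
              · exact absurd h hcc
              · exact h
            refine ⟨c', hmem, ?_⟩
            rw [PySem.Dict.getD_insert, if_neg hcc, ← hcnt_ne c' hcc]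
            exact hlt

-- flatMap of the empty-batch function is empty
theorem pv_flatMap_nil {a b : Type} (S : List a) :
    S.flatMap (fun _ => ([] : List b)) = [] := by
  induction S with
  | nil => rfl
  | cons x xs ih => simp [ih]

-- on success, the pointer loop's positions are (a permutation of) the per-char batches:
-- for any nodup list S covering the query chars, the suffix-prefixes taken per char
theorem pv_perm (starts : PySem.Dict Char (List Int)) (S : List Char) (hS : S.Nodup) :
    ∀ (qs : List Char) (nexti : PySem.Dict Char Int) (positions ps : List Int),
    (∀ c, 0 ≤ nexti.getD c 0) → (∀ c ∈ qs, c ≠ ' ') → (∀ c ∈ qs, c ∈ S) →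
    pvP_loop starts qs nexti positions = some ps →
    ps.Perm (positions ++ S.flatMap
      (fun c => ((starts.getD c []).drop (nexti.getD c 0).toNat).take (qs.count c))) := by
  intro qs
  induction qs with
  | nil =>
    intro nexti positions ps _ _ _ h
    simp only [pvP_loop, Option.some_inj] at h
    subst h
    simp [pv_flatMap_nil]
  | cons c cs ih =>
    intro nexti positions ps h0 hsp hcov h
    have hc : c ≠ ' ' := hsp c List.mem_cons_self
    rw [pvP_loop, if_neg hc] at h
    cases hg : starts.get? c with
    | none => rw [hg] at h; exact absurd h (by simp)
    | some lst =>
      rw [hg] at h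
      replace h : (if nexti.getD c 0 ≥ PySem.List.len lst then none
          else pvP_loop starts cs (nexti.insert c (nexti.getD c 0 + 1))
            (positions ++ [PySem.List.pyGetD lst (nexti.getD c 0) 0])) = some ps := h
      have hgd : starts.getD c [] = lst := PySem.Dict.getD_of_get?_eq_some starts ([] : List Int) hg
      by_cases hge : nexti.getD c 0 ≥ PySem.List.len lst
      · rw [if_pos hge] at h; exact absurd h (by simp)
      · rw [if_neg hge] at h
        have hk0 : 0 ≤ nexti.getD c 0 := h0 c
        rw [PySem.List.len_eq] at hge
        have hklt : (nexti.getD c 0).toNat < lst.length := by omega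
        have hx : PySem.List.pyGetD lst (nexti.getD c 0) 0 = lst[(nexti.getD c 0).toNat] := by
          rw [PySem.List.pyGetD_eq_getElem lst 0 hk0 (by omega)]
        have h0' : ∀ c', 0 ≤ (nexti.insert c (nexti.getD c 0 + 1)).getD c' 0 := by
          intro c'
          rw [PySem.Dict.getD_insert]
          split_ifs
          · omega
          · exact h0 c'
        have hih := ih (nexti.insert c (nexti.getD c 0 + 1))
          (positions ++ [PySem.List.pyGetD lst (nexti.getD c 0) 0]) ps h0'
          (fun c' hc' => hsp c' (List.mem_cons_of_mem _ hc'))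
          (fun c' hc' => hcov c' (List.mem_cons_of_mem _ hc')) h
        -- split S around c
        obtain ⟨S1, S2, hSplit⟩ := List.append_of_mem (hcov c List.mem_cons_self)
        have hndS := hS
        rw [hSplit, List.nodup_append] at hndS
        obtain ⟨hndS1, hndcS2, hdisj⟩ := hndS
        have hcS1 : c ∉ S1 := fun hmem => hdisj _ hmem _ List.mem_cons_self rfl
        have hcS2 : c ∉ S2 := (List.nodup_cons.1 hndcS2).1
        set g : Char → List Int := fun c' =>
          ((starts.getD c' []).drop ((nexti.insert c (nexti.getD c 0 + 1)).getD c' 0).toNat).take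
            (cs.count c') with hgdef
        set f : Char → List Int := fun c' =>
          ((starts.getD c' []).drop (nexti.getD c' 0).toNat).take ((c :: cs).count c') with hfdef
        have hcnt_ne : ∀ c', c' ≠ c → (c :: cs).count c' = cs.count c' := by
          intro c' hcc
          have hcc' : ¬ c = c' := fun hh => hcc hh.symm
          simp [List.count_cons, hcc, hcc']
        have hfg : ∀ c' , c' ≠ c → f c' = g c' := by
          intro c' hcc
          simp only [hfdef, hgdef]
          rw [PySem.Dict.getD_insert, if_neg hcc, hcnt_ne c' hcc]
        have hfc : f c = lst[(nexti.getD c 0).toNat] :: g c := by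
          simp only [hfdef, hgdef]
          rw [PySem.Dict.getD_insert, if_pos rfl, hgd]
          have ht1 : (nexti.getD c 0 + 1).toNat = (nexti.getD c 0).toNat + 1 := by omega
          rw [ht1]
          have hdrop : lst.drop (nexti.getD c 0).toNat
              = lst[(nexti.getD c 0).toNat] :: lst.drop ((nexti.getD c 0).toNat + 1) :=
            List.drop_eq_getElem_cons hklt
          simp only [List.count_cons_self]
          rw [hdrop, List.take_succ_cons]
        have hflat : S.flatMap f
            = S1.flatMap g ++ (lst[(nexti.getD c 0).toNat] :: g c) ++ S2.flatMap g := by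
          rw [hSplit, List.flatMap_append, List.flatMap_cons, hfc]
          have h1 : S1.flatMap f = S1.flatMap g :=
            List.flatMap_congr (fun x hx => hfg x (fun hxc => hcS1 (hxc ▸ hx)))
          have h2 : S2.flatMap f = S2.flatMap g :=
            List.flatMap_congr (fun x hx => hfg x (fun hxc => hcS2 (hxc ▸ hx)))
          rw [h1, h2, ← List.append_assoc]
        have hflatg : S.flatMap g = S1.flatMap g ++ g c ++ S2.flatMap g := by
          rw [hSplit, List.flatMap_append, List.flatMap_cons, ← List.append_assoc]
        refine hih.trans ?_
        rw [hx, hflat, hflatg]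
        have hre : (positions ++ [lst[(nexti.getD c 0).toNat]]) ++
            (S1.flatMap g ++ g c ++ S2.flatMap g)
            = positions ++ ([lst[(nexti.getD c 0).toNat]] ++
              (S1.flatMap g ++ g c ++ S2.flatMap g)) := by
          rw [List.append_assoc]
        rw [hre]
        refine List.Perm.append_left positions ?_
        have hpm := List.perm_middle (a := lst[(nexti.getD c 0).toNat])
          (l₁ := S1.flatMap g) (l₂ := g c ++ S2.flatMap g)
        simpa [List.append_assoc] using hpm.symm

-- B's need dict is the Counter of the space-free lowered query
theorem pv_need_eq_counter (l : List Char) :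
    pvB_need l = PySem.Dict.counter (l.filter (fun c => decide (c ≠ ' '))) := by
  unfold pvB_need
  have hconv : (fun (d : PySem.Dict Char Int) (c : Char) =>
      if c ≠ ' ' then d.insert c (d.getD c 0 + 1) else d)
      = (fun (d : PySem.Dict Char Int) (c : Char) =>
        if decide (c ≠ ' ') = true then d.insert c (d.getD c 0 + 1) else d) := by
    funext d c
    simp
  rw [hconv, PySem.List.foldl_if_eq_foldl_filter, PySem.Dict.foldl_insert_getD_add_one_eq_counter]

-- B's collect succeeds on all-satisfiable items, returning the concatenated prefixes
theorem pv_collect_some (buckets : PySem.Dict Char (List Int)) :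
    ∀ (items : List (Char × Int)) (positions : List Int),
    (∀ p ∈ items, 0 ≤ p.2 ∧ p.2 ≤ PySem.List.len (buckets.getD p.1 [])) →
    pvB_collect buckets items positions =
      some (positions ++ items.flatMap (fun p => (buckets.getD p.1 []).take p.2.toNat)) := by
  intro items
  induction items with
  | nil => intro positions _; simp [pvB_collect]
  | cons p rest ih =>
    intro positions h
    obtain ⟨hp0, hple⟩ := h p List.mem_cons_self
    obtain ⟨c, n⟩ := p
    rw [pvB_collect]
    rw [if_neg (not_lt.2 hple)]
    have hslice : PySem.List.slice (buckets.getD c []) none (some n)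
        = (buckets.getD c []).take n.toNat := by
      conv_lhs => rw [show n = ((n.toNat : Nat) : Int) by omega]
      rw [PySem.List.slice_to_natCast]
    rw [hslice, ih _ (fun q hq => h q (List.mem_cons_of_mem _ hq))]
    simp [List.append_assoc]

-- B's collect fails when some item wants more than its bucket holds
theorem pv_collect_none (buckets : PySem.Dict Char (List Int)) :
    ∀ (items : List (Char × Int)) (positions : List Int),
    (∃ p ∈ items, PySem.List.len (buckets.getD p.1 []) < p.2) →
    pvB_collect buckets items positions = none := by
  intro items
  induction items with
  | nil => rintro positions ⟨p, hp, _⟩; simp at hp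
  | cons q rest ih =>
    rintro positions ⟨p, hp, hlt⟩
    obtain ⟨c, n⟩ := q
    rw [pvB_collect]
    by_cases hbad : n > PySem.List.len (buckets.getD c [])
    · rw [if_pos hbad]
    · rw [if_neg hbad]
      refine ih _ ⟨p, ?_, hlt⟩
      rcases List.mem_cons.1 hp with h | h
      · subst h
        simp only at hlt
        omega
      · exact h

-- ofList is empty only on the empty list
theorem pv_ofList_nil_iff (l : List Char) : PySem.Set.ofList l = [] ↔ l = [] := by
  constructor
  · intro h
    cases l with
    | nil => rfl
    | cons x xs =>
      have : x ∈ PySem.Set.ofList (x :: xs) :=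
        (PySem.Set.mem_ofList _ _).2 List.mem_cons_self
      rw [h] at this
      simp at this
  · intro h; subst h; rfl

-- ===== VERDICT (by name: the statement is the Claim_ definition above) =====
theorem match_word_initials_py_spec : Claim_equal_match_word_initials_py := by
  intro query target target_lower _
  unfold Spec_match_word_initials_py
  unfold match_word_initials_py match_word_initials_py_alt
  dsimp only
  set tl := target_lower.toList with htl
  set qcs := (PySem.Str.lower query).toList.filter (fun c => decide (c ≠ ' ')) with hqcs
  have hneed : (pvB_need (PySem.Str.lower query).toList).items
      = (PySem.Set.ofList qcs).map (fun k => (k, (qcs.count k : Int))) := by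
    rw [pv_need_eq_counter, PySem.Dict.items_counter]
  by_cases htlnil : tl = []
  · have hws : pvA_wordStarts tl = [] := (pv_ws_nil_iff _).2 htlnil
    rw [if_pos hws, if_pos (Or.inr htlnil)]
  · have hws : ¬ pvA_wordStarts tl = [] := fun h => htlnil ((pv_ws_nil_iff _).1 h)
    rw [if_neg hws]
    by_cases hq : qcs = []
    · rw [if_pos hq]
      have hempty : (pvB_need (PySem.Str.lower query).toList).items = [] := by
        rw [hneed, hq]; rfl
      rw [if_pos (Or.inl hempty)]
    · rw [if_neg hq]
      have hitems_ne : ¬ ((pvB_need (PySem.Str.lower query).toList).items = []) := by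
        rw [hneed]
        intro h
        exact hq ((pv_ofList_nil_iff qcs).1 (List.map_eq_nil_iff.1 h))
      rw [if_neg (not_or.2 ⟨hitems_ne, htlnil⟩)]
      have hAeq := (pv_loop_eq tl qcs PySem.Set.empty PySem.Dict.empty [] (pv_inv_init tl)).symm
      have hqf : qcs.filter (fun c => decide (c ≠ ' ')) = qcs := by
        rw [hqcs, List.filter_filter]
        simp
      rw [hqf] at hAeq
      have hnosp : ∀ c ∈ qcs, c ≠ ' ' := by
        intro c hcmem
        have := List.of_mem_filter hcmem
        simpa using this
      have h0 : ∀ c, 0 ≤ (PySem.Dict.empty : PySem.Dict Char Int).getD c 0 := by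
        intro c; rw [PySem.Dict.getD_empty]
      by_cases hC : ∀ c ∈ qcs, (qcs.count c : Int) ≤ PySem.List.len ((pvB_starts tl).getD c [])
      · -- success on both sides
        have hnn : ¬ (pvP_loop (pvB_starts tl) qcs PySem.Dict.empty [] = none) := by
          rw [pv_none_iff (pvB_starts tl) qcs PySem.Dict.empty [] h0 hnosp]
          push Not
          intro c hcmem
          rw [PySem.Dict.getD_empty]
          have := hC c hcmem
          omega
        cases hres : pvP_loop (pvB_starts tl) qcs PySem.Dict.empty [] with
        | none => exact absurd hres hnn
        | some ps =>
          have hAres : pvA_loop tl (PySem.List.enumerate (pvA_wordStarts tl)) qcs []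
              PySem.Set.empty = some ps := hAeq.trans hres
          have hlen : ps.length = qcs.length := by
            simpa using pv_loop_length tl (PySem.List.enumerate (pvA_wordStarts tl))
              qcs [] PySem.Set.empty ps hAres
          have hcoll : pvB_collect (pvB_starts tl)
              (pvB_need (PySem.Str.lower query).toList).items []
              = some ([] ++ ((pvB_need (PySem.Str.lower query).toList).items).flatMap
                  (fun p => ((pvB_starts tl).getD p.1 []).take p.2.toNat)) := by
            refine pv_collect_some (pvB_starts tl) _ [] ?_
            intro p hp
            rw [hneed] at hp
            obtain ⟨c, hcmem, hpe⟩ := List.mem_map.1 hp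
            have hcq : c ∈ qcs := (PySem.Set.mem_ofList _ _).1 hcmem
            subst hpe
            exact ⟨Int.natCast_nonneg _, hC c hcq⟩
          have hperm := pv_perm (pvB_starts tl) (PySem.Set.ofList qcs)
            (PySem.Set.nodup_ofList qcs) qcs PySem.Dict.empty [] ps h0 hnosp
            (fun c hcmem => (PySem.Set.mem_ofList _ _).2 hcmem) hres
          have hbatch : ((pvB_need (PySem.Str.lower query).toList).items).flatMap
              (fun p => ((pvB_starts tl).getD p.1 []).take p.2.toNat)
              = (PySem.Set.ofList qcs).flatMap
                (fun c => (((pvB_starts tl).getD c []).drop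
                  ((PySem.Dict.empty : PySem.Dict Char Int).getD c 0).toNat).take (qcs.count c)) := by
            rw [hneed, List.flatMap_map]
            refine List.flatMap_congr ?_
            intro c _
            rw [PySem.Dict.getD_empty]
            simp
          have hperm' : ps.Perm (((pvB_need (PySem.Str.lower query).toList).items).flatMap
              (fun p => ((pvB_starts tl).getD p.1 []).take p.2.toNat)) := by
            rw [hbatch]
            simpa using hperm
          have hsorted : PySem.List.sorted ps (fun x => x) false
              = PySem.List.sorted (((pvB_need (PySem.Str.lower query).toList).items).flatMap
                (fun p => ((pvB_starts tl).getD p.1 []).take p.2.toNat)) (fun x => x) false :=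
            (PySem.List.sorted_id_eq_sorted_id_iff_perm _ _).2 hperm'
          rw [hAres, hcoll]
          dsimp only
          rw [if_pos hlen]
          simp only [List.nil_append]
          rw [hsorted]
      · -- failure on both sides
        push Not at hC
        obtain ⟨c, hcmem, hlt⟩ := hC
        have hAnone : pvP_loop (pvB_starts tl) qcs PySem.Dict.empty [] = none := by
          rw [pv_none_iff (pvB_starts tl) qcs PySem.Dict.empty [] h0 hnosp]
          exact ⟨c, hcmem, by rw [PySem.Dict.getD_empty]; omega⟩
        have hBnone : pvB_collect (pvB_starts tl)
            (pvB_need (PySem.Str.lower query).toList).items [] = none := by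
          refine pv_collect_none (pvB_starts tl) _ []
            ⟨(c, (qcs.count c : Int)), ?_, hlt⟩
          rw [hneed]
          exact List.mem_map.2 ⟨c, (PySem.Set.mem_ofList _ _).2 hcmem, rfl⟩
        rw [hAeq, hAnone, hBnone]
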